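-- pv_equiv track=rewrite | github.com/IvanKalug-QA/codewars | ReOrdering.py | re_ordering
-- ===== SOURCE A (Python) =====
-- from collections import deque
--
-- def re_ordering(text):
--     res = deque([])
--     for i in text.split():
--         if i[0].isupper():
--             res.appendleft(i)
--         else:
--             res.append(i)
--     return " ".join(i for i in res)
-- ===== SOURCE B (Python) =====
-- def re_ordering(text):
--     words = text.split()
--     upper = [w for w in words if w[0].isupper()]
--     lower = [w for w in words if not w[0].isupper()]
--     return " ".join(upper[::-1] + lower)
-- ===== Notes on version B (the rewrite author's own statement) =====
-- stated objective: simpler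
-- what changed: Replaces the single interleaved deque pass (appendleft/append per word) with a partition into two filtered lists, reversing the uppercase-first list and concatenating before the join.
import Mathlib
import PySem

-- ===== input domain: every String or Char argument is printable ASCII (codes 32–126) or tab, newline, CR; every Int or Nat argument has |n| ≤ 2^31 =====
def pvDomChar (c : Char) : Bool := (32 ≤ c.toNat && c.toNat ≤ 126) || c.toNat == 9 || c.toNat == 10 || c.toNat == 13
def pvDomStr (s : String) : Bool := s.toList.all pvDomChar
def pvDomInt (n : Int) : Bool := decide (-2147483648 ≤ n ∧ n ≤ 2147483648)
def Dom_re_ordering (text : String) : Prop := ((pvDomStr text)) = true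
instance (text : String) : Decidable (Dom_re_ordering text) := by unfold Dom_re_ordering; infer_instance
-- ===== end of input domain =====

-- B replaces A's single interleaved deque pass with a partition into two filtered
-- lists (uppercase-first reversed, then the rest), for a simpler decomposition.

-- i[0].isupper(); split() never yields an empty word, so the none branch is unreachable
def pvUpFirst (w : String) : Bool :=
  match PySem.Str.pyGet? w 0 with
  | some c => PySem.Chars.isupper c
  | none => false

-- ===== PORT A =====
def re_ordering (text : String) : String :=
  PySem.Str.join " "
    ((PySem.Str.split₀ text).foldl
      (fun res i => if pvUpFirst i then i :: res else res ++ [i]) [])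

-- ===== PORT B =====
def re_ordering_alt (text : String) : String :=
  let words := PySem.Str.split₀ text
  PySem.Str.join " "
    ((words.filter pvUpFirst).reverse ++ words.filter (fun w => !pvUpFirst w))

-- ===== PRECONDITION & SPEC =====
def Spec_re_ordering (text : String) (out : String) : Prop := out = re_ordering_alt text
instance (text : String) (out : String) : Decidable (Spec_re_ordering text out) := by unfold Spec_re_ordering; infer_instance

-- ===== CLAIM (what is proved, stated in full; the proofs are below) =====
def Claim_equal_re_ordering : Prop := ∀ (text : String), Dom_re_ordering text → Spec_re_ordering text (re_ordering text)

-- ===== LEMMAS AND PROOFS =====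
theorem pv_fold_eq_partition (ws acc : List String) :
    ws.foldl (fun res i => if pvUpFirst i then i :: res else res ++ [i]) acc
      = (ws.filter pvUpFirst).reverse ++ acc ++ ws.filter (fun w => !pvUpFirst w) := by
  induction ws generalizing acc with
  | nil => simp
  | cons i ws ih =>
    by_cases h : pvUpFirst i = true <;>
      simp [List.foldl_cons, ih, h]

-- ===== VERDICT (by name: the statement is the Claim_ definition above) =====
theorem re_ordering_spec : Claim_equal_re_ordering := by
  intro text _
  show _ = _
  simp [re_ordering, re_ordering_alt, pv_fold_eq_partition]
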